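-- pv_equiv track=rewrite | github.com/JuwonKim2022/python_algorithm | ch06/sol0606.py | sol_0606
-- ===== SOURCE A (Python) =====
-- def sol_0606(nums, k):
--     total = sum(nums)
--     m = len(nums)-k #남는 갯수
--     score = 0
--
--     for i in range(m):
--         score += nums[i]
--
--     minS = score
--
--     #슬라이딩 윈도우
--     left = 0
--     for right in range(m,len(nums)):
--         score += (nums[right]-nums[left])
--         left += 1
--
--         minS = min(minS, score)
--
--     return total - minS
-- ===== SOURCE B (Python) =====
-- def sol_0606(nums, k):
--     # Prefix-sum table: P[i] = sum of nums[:i]; each size-m window sum is a direct difference.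
--     P = [0]
--     for x in nums:
--         P.append(P[-1] + x)
--     m = len(nums) - k
--     minS = min(P[i + m] - P[i] for i in range(k + 1))
--     return P[len(nums)] - minS
-- ===== Notes on version B (the rewrite author's own statement) =====
-- stated objective: alternative
-- what changed: Replaces A's incrementally maintained sliding-window accumulator with a precomputed prefix-sum table and a separate pass taking direct P[i+m]-P[i] differences.
import Mathlib
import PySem

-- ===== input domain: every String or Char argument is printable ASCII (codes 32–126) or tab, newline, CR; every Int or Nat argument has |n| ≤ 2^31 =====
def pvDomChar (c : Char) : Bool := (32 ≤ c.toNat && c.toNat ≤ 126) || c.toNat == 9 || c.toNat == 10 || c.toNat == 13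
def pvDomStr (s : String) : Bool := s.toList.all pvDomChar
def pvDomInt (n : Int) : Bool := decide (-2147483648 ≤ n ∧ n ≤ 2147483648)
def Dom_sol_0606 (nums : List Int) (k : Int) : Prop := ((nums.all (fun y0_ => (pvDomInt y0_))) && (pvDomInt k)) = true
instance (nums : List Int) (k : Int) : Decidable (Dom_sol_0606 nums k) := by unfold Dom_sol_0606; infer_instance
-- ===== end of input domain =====

-- B replaces A's incrementally slid running window sum by a prefix-sum table with direct
-- window differences (alternative decomposition, same O(n) cost).

-- ===== PORT A =====
def sol_0606 (nums : List Int) (k : Int) : Int :=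
  let total := nums.sum
  let m : Int := (nums.length : Int) - k
  let score := (PySem.List.pyRange 0 m 1).foldl (fun s i => s + PySem.List.pyGetD nums i 0) 0
  let st := (PySem.List.pyRange m (nums.length : Int) 1).foldl
    (fun (p : Int × Int × Int) right =>
      let score := p.1 + (PySem.List.pyGetD nums right 0 - PySem.List.pyGetD nums p.2.1 0)
      let left := p.2.1 + 1
      (score, left, min p.2.2 score)) (score, 0, score)
  total - st.2.2

-- ===== PORT B =====
def sol_0606_alt (nums : List Int) (k : Int) : Int :=
  let P := nums.foldl (fun acc x => acc ++ [PySem.List.pyGetD acc (-1) 0 + x]) [(0 : Int)]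
  let m : Int := (nums.length : Int) - k
  let minS := (PySem.List.min? ((PySem.List.pyRange 0 (k + 1) 1).map
      (fun i => PySem.List.pyGetD P (i + m) 0 - PySem.List.pyGetD P i 0)) (fun x => x)).getD 0
  PySem.List.pyGetD P (nums.length : Int) 0 - minS

-- ===== PRECONDITION & SPEC =====
-- A raises IndexError (negative or out-of-range indexing) whenever k < 0 or k > len(nums);
-- Pre_ is exactly the inputs on which the Python A returns.
def Pre_sol_0606 (nums : List Int) (k : Int) : Prop := 0 ≤ k ∧ k ≤ (nums.length : Int)
instance (nums : List Int) (k : Int) : Decidable (Pre_sol_0606 nums k) := by unfold Pre_sol_0606; infer_instance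
def pvWitness_sol_0606 : List Int × Int := ([3, -1, 4, 1], 2)

def Spec_sol_0606 (nums : List Int) (k : Int) (out : Int) : Prop := out = sol_0606_alt nums k
instance (nums : List Int) (k : Int) (out : Int) : Decidable (Spec_sol_0606 nums k out) := by unfold Spec_sol_0606; infer_instance

-- ===== CLAIM (what is proved, stated in full; the proofs are below) =====
def Claim_equal_sol_0606 : Prop := ∀ (nums : List Int) (k : Int), Dom_sol_0606 nums k → Pre_sol_0606 nums k → Spec_sol_0606 nums k (sol_0606 nums k)

-- ===== LEMMAS AND PROOFS =====

-- window sum, as a prefix-sum difference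
def pvWin (nums : List Int) (m i : Nat) : Int := (nums.take (i + m)).sum - (nums.take i).sum

theorem pv_P_eq_aux (nums : List Int) : ∀ (ys : List Int) (s : Int),
    nums.foldl (fun acc x => acc ++ [PySem.List.pyGetD acc (-1) 0 + x]) (ys ++ [s])
    = ys ++ [s] ++ (List.range nums.length).map (fun i => s + (nums.take (i + 1)).sum) := by
  induction nums with
  | nil => simp
  | cons x t ih =>
    intro ys s
    simp only [List.foldl_cons, PySem.List.pyGetD_neg_one_append_singleton]
    rw [show ys ++ [s] ++ [s + x] = (ys ++ [s]) ++ [s + x] from rfl, ih]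
    simp [List.range_succ_eq_map, List.map_map, Function.comp, List.take_succ_cons, add_assoc]

theorem pv_P_eq (nums : List Int) :
    nums.foldl (fun acc x => acc ++ [PySem.List.pyGetD acc (-1) 0 + x]) [(0 : Int)]
    = (List.range (nums.length + 1)).map (fun i => (nums.take i).sum) := by
  have := pv_P_eq_aux nums [] 0
  simp only [List.nil_append] at this
  rw [this, List.range_succ_eq_map]
  simp [List.map_map, Function.comp]

theorem pv_getP (nums : List Int) (i : Nat) (hi : i ≤ nums.length) :
    PySem.List.pyGetD ((List.range (nums.length + 1)).map (fun j => (nums.take j).sum)) (i : Int) 0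
    = (nums.take i).sum := by
  rw [PySem.List.pyGetD_natCast]
  rw [List.getD_eq_getElem?_getD, List.getElem?_map]
  simp [List.getElem?_range (by omega : i < nums.length + 1)]

-- initial score: sum of the first m elements
theorem pv_score_init (nums : List Int) : ∀ (m : Nat), m ≤ nums.length →
    (PySem.List.pyRange 0 (m : Int) 1).foldl (fun s i => s + PySem.List.pyGetD nums i 0) 0
    = (nums.take m).sum := by
  intro m hm
  induction m with
  | zero => simp [PySem.List.pyRange_one_eq_nil]
  | succ n ih =>
    have h1 : ((n : Int) + 1) = ((n + 1 : Nat) : Int) := by push_cast; ring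
    rw [← h1, PySem.List.pyRange_one_succ_right (by positivity), List.foldl_append]
    rw [ih (by omega)]
    simp only [List.foldl_cons, List.foldl_nil]
    rw [PySem.List.pyGetD_natCast, List.getD_eq_getElem?_getD,
        List.getElem?_eq_getElem (by omega : n < nums.length)]
    rw [List.sum_take_succ _ n (by omega)]
    simp

theorem pv_win_step (nums : List Int) (m l : Nat) (h : l + m < nums.length) :
    pvWin nums m (l + 1) = pvWin nums m l + (nums[l + m]'h - nums[l]'(by omega)) := by
  unfold pvWin
  rw [show l + 1 + m = (l + m) + 1 from by omega, List.sum_take_succ _ _ h,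
      List.sum_take_succ _ l (by omega)]
  ring

theorem pv_loop (nums : List Int) (m : Nat) : ∀ (c l : Nat) (mn : Int), l + m + c = nums.length →
    (PySem.List.pyRange ((l + m : Nat) : Int) ((nums.length : Nat) : Int) 1).foldl
      (fun (p : Int × Int × Int) right =>
        let score := p.1 + (PySem.List.pyGetD nums right 0 - PySem.List.pyGetD nums p.2.1 0)
        let left := p.2.1 + 1
        (score, left, min p.2.2 score)) (pvWin nums m l, (l : Int), mn)
    = (pvWin nums m (l + c), ((l + c : Nat) : Int),
       ((List.range c).map (fun j => pvWin nums m (l + 1 + j))).foldl min mn) := by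
  intro c
  induction c with
  | zero =>
    intro l mn h
    rw [PySem.List.pyRange_one_eq_nil (by omega)]
    simp
  | succ c ih =>
    intro l mn h
    rw [PySem.List.pyRange_one_cons (by exact_mod_cast (by omega : l + m < nums.length))]
    simp only [List.foldl_cons]
    have hg1 : PySem.List.pyGetD nums ((l + m : Nat) : Int) 0 = nums[l + m]'(by omega) := by
      rw [PySem.List.pyGetD_natCast, List.getD_eq_getElem?_getD,
          List.getElem?_eq_getElem (by omega : l + m < nums.length)]; simp
    have hg2 : PySem.List.pyGetD nums ((l : Nat) : Int) 0 = nums[l]'(by omega) := by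
      rw [PySem.List.pyGetD_natCast, List.getD_eq_getElem?_getD,
          List.getElem?_eq_getElem (by omega : l < nums.length)]; simp
    have hstep := pv_win_step nums m l (by omega)
    have hcast : ((l : Int) + m) + 1 = ((l + 1 + m : Nat) : Int) := by push_cast; ring
    have hl1 : (l : Int) + 1 = ((l + 1 : Nat) : Int) := by push_cast; ring
    simp only [hg1, hg2]
    rw [show (((l + m : Nat) : Int)) + 1 = ((l + 1 + m : Nat) : Int) from by push_cast; ring]
    rw [show (pvWin nums m l + (nums[l + m]'(by omega) - nums[l]'(by omega)) : Int)
          = pvWin nums m (l + 1) from (hstep).symm, hl1]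
    rw [ih (l + 1) (min mn (pvWin nums m (l + 1))) (by omega)]
    simp only [List.range_succ_eq_map, List.map_cons, List.map_map, List.foldl_cons, add_zero]
    refine congrArg₂ _ (by congr 1; omega) (congrArg₂ _ (by congr 1; omega) ?_)
    congr 1
    apply List.map_congr_left
    intro j _
    simp only [Function.comp]
    congr 1
    omega

-- ===== VERDICT (by name: the statement is the Claim_ definition above) =====
theorem sol_0606_spec : Claim_equal_sol_0606 := by
  intro nums k _ hpre
  obtain ⟨hk0, hkl⟩ := hpre
  unfold Spec_sol_0606
  simp only [sol_0606, sol_0606_alt]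
  set K : Nat := k.toNat with hK
  have hkK : k = (K : Int) := by omega
  have hKl : K ≤ nums.length := by omega
  set M : Nat := nums.length - K with hM
  have hmM : (nums.length : Int) - k = (M : Int) := by omega
  have hMK : M + K = nums.length := by omega
  rw [pv_P_eq, hmM]
  -- B's returned prefix value
  rw [show ((nums.length : Nat) : Int) = ((nums.length : Nat) : Int) from rfl]
  rw [pv_getP nums nums.length (le_refl _), List.take_length]
  -- B's window list = pvWin over range (K+1)
  have hlist : (PySem.List.pyRange 0 (k + 1) 1).map
      (fun i => PySem.List.pyGetD ((List.range (nums.length + 1)).map (fun j => (nums.take j).sum)) (i + (M : Int)) 0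
        - PySem.List.pyGetD ((List.range (nums.length + 1)).map (fun j => (nums.take j).sum)) i 0)
      = (List.range (K + 1)).map (fun i => pvWin nums M i) := by
    rw [PySem.List.pyRange_one, show k + 1 - 0 = ((K + 1 : Nat) : Int) from by omega]
    rw [Int.toNat_natCast, List.map_map]
    apply List.map_congr_left
    intro j hj
    have hjk : j < K + 1 := List.mem_range.mp hj
    simp only [Function.comp, zero_add]
    rw [show (j : Int) + (M : Int) = ((j + M : Nat) : Int) from by push_cast; ring]
    rw [pv_getP nums (j + M) (by omega), pv_getP nums j (by omega)]
    unfold pvWin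
    rw [show j + M = j + M from rfl]
  rw [hlist]
  -- peel the first window off B's min
  rw [List.range_succ_eq_map, List.map_cons, PySem.List.min?_id_cons]
  simp only [Option.getD_some, List.map_map]
  -- A's side
  rw [pv_score_init nums M (by omega)]
  have hw0 : (nums.take M).sum = pvWin nums M 0 := by unfold pvWin; simp
  rw [hw0]
  have := pv_loop nums M K 0 (pvWin nums M 0) (by omega)
  simp only [Nat.zero_add, Nat.cast_zero] at this
  rw [show ((M : Int)) = ((0 + M : Nat) : Int) from by push_cast; ring] at this ⊢
  rw [this]
  congr 1
  dsimp only
  congr 1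
  apply List.map_congr_left
  intro j _
  simp only [Function.comp]
  congr 1
  omega
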